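-- pv_equiv track=rewrite | github.com/vwvwvwvwvwvw-lab/weaving_sim | weaving_sim.py | thread_sequence
-- ===== SOURCE A (Python) =====
-- from typing import List, Optional, Tuple, Iterable
--
-- def thread_sequence(
--     runs: Iterable[Tuple[str, int]],
--     count: int,
-- ) -> List[str]:
--     """
--     Expand color runs into a repeating list.
--
--     Example:
--       thread_sequence([("#000", 1), ("#fff", 1)], 6)
--         -> #000 #fff #000 #fff #000 #fff
--
--       thread_sequence([("#000", 4), ("#fff", 4)], 16)
--         -> #### #### #### ####
--     """
--     if count <= 0:
--         return []
--
--     seq: List[str] = []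
--     for color, n in runs:
--         if n <= 0:
--             raise ValueError("run lengths must be > 0")
--         seq.extend([color] * n)
--
--     if not seq:
--         raise ValueError("runs must not be empty")
--
--     out: List[str] = []
--     while len(out) < count:
--         out.extend(seq)
--
--     return out[:count]
-- ===== SOURCE B (Python) =====
-- def thread_sequence(runs, count):
--     if count <= 0:
--         return []
--     pairs = list(runs)
--     for _color, n in pairs:
--         if n <= 0:
--             raise ValueError("run lengths must be > 0")
--     if not pairs:
--         raise ValueError("runs must not be empty")
--     out = []
--     remaining = count
--     while remaining > 0:
--         for color, n in pairs:
--             if remaining <= 0: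
--                 break
--             take = n if n < remaining else remaining
--             out.extend([color] * take)
--             remaining -= take
--     return out
-- ===== Notes on version B (the rewrite author's own statement) =====
-- stated objective: alternative
-- what changed: B never materializes the expanded cycle and never overshoots-and-slices: it streams the output in a single counting-down pass, walking the runs cyclically with a remaining counter and emitting min(n, remaining) copies of each run's color until remaining hits 0.
import Mathlib
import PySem

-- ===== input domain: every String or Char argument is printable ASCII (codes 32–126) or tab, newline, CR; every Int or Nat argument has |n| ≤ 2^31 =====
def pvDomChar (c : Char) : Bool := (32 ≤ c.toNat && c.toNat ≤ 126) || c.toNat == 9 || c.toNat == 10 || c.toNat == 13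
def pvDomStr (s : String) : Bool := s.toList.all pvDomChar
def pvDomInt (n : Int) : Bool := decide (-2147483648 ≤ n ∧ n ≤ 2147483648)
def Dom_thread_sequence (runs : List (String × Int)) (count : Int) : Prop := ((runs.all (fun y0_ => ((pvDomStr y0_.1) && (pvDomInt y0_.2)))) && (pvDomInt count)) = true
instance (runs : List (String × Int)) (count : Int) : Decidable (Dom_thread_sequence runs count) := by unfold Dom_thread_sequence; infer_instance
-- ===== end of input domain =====

-- B streams the output in one counting-down pass over the runs (emitting min(n, remaining)
-- copies per run, cyclically) instead of A's build-the-cycle-then-overshoot-and-slice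
-- (objective: alternative decomposition, same order of cost).

-- ===== PORT A =====
-- the while loop 'while len(out) < count: out.extend(seq)'; fuel count+1 suffices because under
-- Pre_ seq is nonempty, so each iteration adds at least one element.
def pvWhileExtend (seq : List String) (count : Nat) : Nat → List String → List String
  | 0, out => out
  | fuel+1, out => if out.length < count then pvWhileExtend seq count fuel (out ++ seq) else out

def thread_sequence (runs : List (String × Int)) (count : Int) : List String :=
  if count ≤ 0 then []
  else
    -- seq.extend([color] * n); Python raises ValueError on n ≤ 0, excluded by Pre_
    let seq := runs.foldl (fun acc (p : String × Int) => acc ++ List.replicate p.2.toNat p.1) []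
    if seq = [] then []  -- Python raises ValueError here; outside Pre_
    else (pvWhileExtend seq count.toNat (count.toNat + 1) []).take count.toNat

-- ===== PORT B =====
-- the inner 'for color, n in pairs' with its 'if remaining <= 0: break'
def pvInnerFor : List (String × Int) → Int → List String → (Int × List String)
  | [], rem, out => (rem, out)
  | p :: ps, rem, out =>
    if rem ≤ 0 then (rem, out)
    else
      let take := if p.2 < rem then p.2 else rem
      pvInnerFor ps (rem - take) (out ++ List.replicate take.toNat p.1)

-- the outer 'while remaining > 0'; fuel count suffices because under Pre_ every outer
-- iteration decreases remaining by at least 1.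
def pvOuterWhile (pairs : List (String × Int)) : Nat → Int → List String → List String
  | 0, _, out => out
  | fuel+1, rem, out =>
    if 0 < rem then
      let s := pvInnerFor pairs rem out
      pvOuterWhile pairs fuel s.1 s.2
    else out

def thread_sequence_alt (runs : List (String × Int)) (count : Int) : List String :=
  if count ≤ 0 then []
  else if runs.any (fun p => p.2 ≤ 0) then []  -- Python raises ValueError; outside Pre_
  else if runs = [] then []                     -- Python raises ValueError; outside Pre_
  else pvOuterWhile runs count.toNat count []

-- ===== PRECONDITION & SPEC =====
-- Pre_ excludes exactly the inputs where A raises ValueError: with count > 0, a run with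
-- length ≤ 0, or empty runs. A returns on all other inputs.
def Pre_thread_sequence (runs : List (String × Int)) (count : Int) : Prop :=
  count ≤ 0 ∨ (runs ≠ [] ∧ ∀ p ∈ runs, 0 < p.2)
instance (runs : List (String × Int)) (count : Int) : Decidable (Pre_thread_sequence runs count) := by unfold Pre_thread_sequence; infer_instance

def pvWitness_thread_sequence : (List (String × Int)) × Int := ([("#000", 1), ("#fff", 2)], 7)

def Spec_thread_sequence (runs : List (String × Int)) (count : Int) (out : List String) : Prop := out = thread_sequence_alt runs count
instance (runs : List (String × Int)) (count : Int) (out : List String) : Decidable (Spec_thread_sequence runs count out) := by unfold Spec_thread_sequence; infer_instance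

-- ===== CLAIM (what is proved, stated in full; the proofs are below) =====
def Claim_equal_thread_sequence : Prop := ∀ (runs : List (String × Int)) (count : Int), Dom_thread_sequence runs count → Pre_thread_sequence runs count → Spec_thread_sequence runs count (thread_sequence runs count)

-- ===== LEMMAS AND PROOFS =====

-- the fully expanded one-cycle list (proof-side only; B never builds it)
def pvSeqOf (pairs : List (String × Int)) : List String :=
  pairs.flatMap (fun p => List.replicate p.2.toNat p.1)

-- A's foldl-extend builds exactly pvSeqOf.
lemma pv_seq_eq (runs : List (String × Int)) :
    runs.foldl (fun acc (p : String × Int) => acc ++ List.replicate p.2.toNat p.1) [] =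
      pvSeqOf runs := by
  simpa using PySem.List.foldl_append_eq_flatMap
    (fun p : String × Int => List.replicate p.2.toNat p.1) runs []

-- take n of k repetitions of seq, when k·L covers n, is the divmod closed form
-- (the canonical form both programs' results are reduced to).
lemma pv_take_flatten_replicate (seq : List String) (hne : seq ≠ []) :
    ∀ (k n : Nat), n ≤ k * seq.length →
      (List.flatten (List.replicate k seq)).take n =
        List.flatten (List.replicate (n / seq.length) seq) ++ seq.take (n % seq.length) := by
  intro k
  induction k with
  | zero =>
    intro n hn
    simp at hn
    subst hn
    simp
  | succ k ih =>
    intro n hn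
    have hL : 0 < seq.length := List.length_pos_iff.mpr hne
    by_cases h : n < seq.length
    · rw [List.replicate_succ, List.flatten_cons, List.take_append_of_le_length (le_of_lt h),
        Nat.div_eq_of_lt h, Nat.mod_eq_of_lt h]
      simp
    · have hge : seq.length ≤ n := by omega
      have hrec := ih (n - seq.length) (by
        have e1 : (k + 1) * seq.length = k * seq.length + seq.length := by ring
        omega)
      have h1 : 1 ≤ n / seq.length := (Nat.one_le_div_iff hL).mpr hge
      have hdiv : (n - seq.length) / seq.length = n / seq.length - 1 := by
        simpa using Nat.sub_mul_div n seq.length 1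
      have hmod : (n - seq.length) % seq.length = n % seq.length :=
        (Nat.mod_eq_sub_mod hge).symm
      obtain ⟨m, hm⟩ : ∃ m, n / seq.length = m + 1 := ⟨n / seq.length - 1, by omega⟩
      rw [List.replicate_succ, List.flatten_cons, List.take_append,
        List.take_of_length_le hge, hrec, hdiv, hmod, hm]
      simp [List.replicate_succ, List.append_assoc]

-- the prefix of k repetitions does not depend on k once k·L covers it
lemma pv_take_indep (seq : List String) (hne : seq ≠ []) (k k' n : Nat)
    (h : n ≤ k * seq.length) (h' : n ≤ k' * seq.length) :
    (List.flatten (List.replicate k seq)).take n =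
      (List.flatten (List.replicate k' seq)).take n := by
  rw [pv_take_flatten_replicate seq hne k n h, pv_take_flatten_replicate seq hne k' n h']

-- A's while loop produces a whole number of copies of seq covering count.
lemma pv_whileExtend_flatten (seq : List String) (count : Nat) :
    ∀ (fuel j : Nat), count ≤ j * seq.length + fuel * seq.length →
      ∃ k, pvWhileExtend seq count fuel (List.flatten (List.replicate j seq)) =
            List.flatten (List.replicate k seq) ∧ count ≤ k * seq.length := by
  intro fuel
  induction fuel with
  | zero =>
    intro j hj
    exact ⟨j, rfl, by omega⟩
  | succ fuel ih =>
    intro j hj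
    rw [pvWhileExtend]
    by_cases h : (List.flatten (List.replicate j seq)).length < count
    · simp only [h, if_true]
      have : List.flatten (List.replicate j seq) ++ seq = List.flatten (List.replicate (j+1) seq) := by
        rw [List.replicate_succ']
        simp
      rw [this]
      exact ih (j+1) (by
        have e1 : (fuel + 1) * seq.length = fuel * seq.length + seq.length := by ring
        have e2 : (j + 1) * seq.length = j * seq.length + seq.length := by ring
        omega)
    · simp only [h, if_false]
      refine ⟨j, rfl, ?_⟩
      have : (List.flatten (List.replicate j seq)).length = j * seq.length := by
        simp [List.length_flatten]
      omega

-- the inner break-guard: with remaining ≤ 0 the inner for emits nothing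
lemma pvInner_stop (ps : List (String × Int)) (rem : Int) (out : List String) (h : rem ≤ 0) :
    pvInnerFor ps rem out = (rem, out) := by
  cases ps with
  | nil => rfl
  | cons p ps => simp [pvInnerFor, h]

-- one inner pass emits the first min(rem, L) elements of the cycle and subtracts that much
lemma pvInner_spec (pairs : List (String × Int)) (hpos : ∀ p ∈ pairs, 0 < p.2) :
    ∀ (rem : Int) (out : List String), 0 < rem →
      pvInnerFor pairs rem out =
        (rem - min rem ((pvSeqOf pairs).length : Int),
         out ++ (pvSeqOf pairs).take (min rem ((pvSeqOf pairs).length : Int)).toNat) := by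
  induction pairs with
  | nil =>
    intro rem out hrem
    simp [pvInnerFor, pvSeqOf]
    omega
  | cons p ps ih =>
    intro rem out hrem
    have hp : 0 < p.2 := hpos p List.mem_cons_self
    have hps : ∀ q ∈ ps, 0 < q.2 := fun q hq => hpos q (List.mem_cons_of_mem p hq)
    have hseq : pvSeqOf (p :: ps) = List.replicate p.2.toNat p.1 ++ pvSeqOf ps := by
      simp [pvSeqOf]
    have hlen : ((pvSeqOf (p :: ps)).length : Int) = (p.2.toNat : Int) + ((pvSeqOf ps).length : Int) := by
      rw [hseq]; push_cast [List.length_append, List.length_replicate]; ring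
    rw [pvInnerFor]
    simp only [if_neg (by omega : ¬ rem ≤ 0)]
    by_cases hlt : p.2 < rem
    · simp only [if_pos hlt]
      rw [ih hps (rem - p.2) _ (by omega)]
      have e1 : rem - p.2 - min (rem - p.2) ((pvSeqOf ps).length : Int)
          = rem - min rem (((pvSeqOf (p :: ps)).length : Int)) := by
        rw [hlen]; omega
      have e2 : (min rem (((pvSeqOf (p :: ps)).length : Int))).toNat
          = p.2.toNat + (min (rem - p.2) ((pvSeqOf ps).length : Int)).toNat := by
        rw [hlen]; omega
      rw [e1, e2, hseq]
      rw [List.take_append]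
      have : (List.replicate p.2.toNat p.1).take (p.2.toNat + (min (rem - p.2) ((pvSeqOf ps).length : Int)).toNat)
          = List.replicate p.2.toNat p.1 := by
        apply List.take_of_length_le; simp
      rw [this]
      simp [List.append_assoc, List.length_replicate]
    · simp only [if_neg hlt]
      rw [pvInner_stop ps (rem - rem) _ (by omega)]
      have hm : min rem (((pvSeqOf (p :: ps)).length : Int)) = rem := by
        rw [hlen]; omega
      rw [hm]
      have : (pvSeqOf (p :: ps)).take rem.toNat = List.replicate rem.toNat p.1 := by
        rw [hseq, List.take_append]
        have h1 : (List.replicate p.2.toNat p.1).take rem.toNat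
            = List.replicate rem.toNat p.1 := by
          rw [List.take_replicate]
          congr 1
          omega
        have h2 : rem.toNat - (List.replicate p.2.toNat p.1).length = 0 := by
          simp only [List.length_replicate]; omega
        rw [h2, h1]
        simp
      rw [this]

-- the outer while emits exactly the first rem elements of the infinite cycle
lemma pvOuter_spec (pairs : List (String × Int)) (hpos : ∀ p ∈ pairs, 0 < p.2)
    (hne : pvSeqOf pairs ≠ []) :
    ∀ (fuel : Nat) (rem : Int) (out : List String), rem ≤ (fuel : Int) →
      pvOuterWhile pairs fuel rem out =
        out ++ (List.flatten (List.replicate rem.toNat (pvSeqOf pairs))).take rem.toNat := by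
  have hL : 0 < (pvSeqOf pairs).length := List.length_pos_iff.mpr hne
  intro fuel
  induction fuel with
  | zero =>
    intro rem out hf
    have : rem.toNat = 0 := by omega
    rw [this]
    simp [pvOuterWhile]
  | succ fuel ih =>
    intro rem out hf
    rw [pvOuterWhile]
    by_cases hrem : 0 < rem
    · simp only [if_pos hrem]
      rw [pvInner_spec pairs hpos rem out hrem]
      set S : Int := ((pvSeqOf pairs).length : Int) with hS
      have hrec := ih (rem - min rem S) (out ++ (pvSeqOf pairs).take (min rem S).toNat)
        (by omega)
      simp only at hrec
      rw [hrec, List.append_assoc]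
      congr 1
      -- now a pure statement about the cycle prefix; move to Nat
      set R : Nat := rem.toNat with hR
      have hRpos : 0 < R := by omega
      by_cases hcase : rem ≤ S
      · -- one (partial) pass finishes: min = rem, remaining becomes 0
        have h1 : min rem S = rem := by omega
        have h2 : (rem - min rem S).toNat = 0 := by omega
        rw [h2, h1]
        simp only [List.replicate_zero, List.flatten_nil, List.take_nil, List.append_nil]
        obtain ⟨R', hR'⟩ : ∃ R', R = R' + 1 := ⟨R - 1, by omega⟩
        rw [hR']
        rw [List.replicate_succ, List.flatten_cons, List.take_append]
        have : R' + 1 - (pvSeqOf pairs).length = 0 := by omega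
        rw [this]
        simp
        omega
      · -- a full pass: min = S, then recurse on rem - S
        have h1 : min rem S = S := by omega
        have h2 : (rem - min rem S).toNat = R - (pvSeqOf pairs).length := by omega
        rw [h2, h1]
        have h3 : (pvSeqOf pairs).take S.toNat = pvSeqOf pairs := by
          apply List.take_of_length_le; omega
        rw [h3]
        obtain ⟨R', hR'⟩ : ∃ R', R = R' + 1 := ⟨R - 1, by omega⟩
        have hRS : (pvSeqOf pairs).length ≤ R := by omega
        rw [hR', List.replicate_succ, List.flatten_cons, List.take_append,
          List.take_of_length_le (by omega : (pvSeqOf pairs).length ≤ R' + 1)]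
        congr 1
        have e : R' + 1 - (pvSeqOf pairs).length = R - (pvSeqOf pairs).length := by omega
        rw [e]
        apply pv_take_indep (pvSeqOf pairs) hne
        · exact Nat.le_mul_of_pos_right _ hL
        · calc R - (pvSeqOf pairs).length ≤ R' := by omega
            _ ≤ R' * (pvSeqOf pairs).length := Nat.le_mul_of_pos_right _ hL
    · simp only [if_neg hrem]
      have : rem.toNat = 0 := by omega
      rw [this]
      simp

-- ===== VERDICT (by name: the statement is the Claim_ definition above) =====
theorem thread_sequence_spec : Claim_equal_thread_sequence := by
  intro runs count _ hpre
  unfold Spec_thread_sequence thread_sequence thread_sequence_alt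
  by_cases hc : count ≤ 0
  · simp [hc]
  · have hpos : ∀ p ∈ runs, 0 < p.2 := by
      rcases hpre with h | ⟨_, h⟩
      · omega
      · exact h
    have hnil : runs ≠ [] := by
      rcases hpre with h | ⟨h, _⟩
      · omega
      · exact h
    have hany : runs.any (fun p => p.2 ≤ 0) = false := by
      simp only [List.any_eq_false, decide_eq_true_eq]
      intro p hp
      have := hpos p hp
      omega
    simp only [if_neg hc, hany, Bool.false_eq_true, if_false, if_neg hnil, pv_seq_eq]
    have hne : pvSeqOf runs ≠ [] := by
      obtain ⟨p, t, rfl⟩ : ∃ p t, runs = p :: t := by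
        cases runs with
        | nil => exact absurd rfl hnil
        | cons p t => exact ⟨p, t, rfl⟩
      have hp : 0 < p.2 := hpos p List.mem_cons_self
      have hlen : 0 < (pvSeqOf (p :: t)).length := by
        simp only [pvSeqOf, List.flatMap_cons, List.length_append, List.length_replicate]
        omega
      exact List.ne_nil_of_length_pos hlen
    simp only [if_neg hne]
    have hL : 0 < (pvSeqOf runs).length := List.length_pos_iff.mpr hne
    obtain ⟨k, hk, hkc⟩ := pv_whileExtend_flatten (pvSeqOf runs) count.toNat (count.toNat + 1) 0
      (by nlinarith)
    have hk' : pvWhileExtend (pvSeqOf runs) count.toNat (count.toNat + 1) [] =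
        List.flatten (List.replicate k (pvSeqOf runs)) := by simpa using hk
    rw [hk']
    rw [pvOuter_spec runs hpos hne count.toNat count [] (by omega)]
    simp only [List.nil_append]
    apply pv_take_indep (pvSeqOf runs) hne k count.toNat count.toNat hkc
    exact Nat.le_mul_of_pos_right _ hL
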